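-- pv_equiv track=rewrite | github.com/sarnthil/thesis | datasets/mmf2jsonl.py | fix_ingredients
-- ===== SOURCE A (Python) =====
-- def fix_ingredients(ingredients):
--     bfr = None
--     def decolumn(ceva):
--         for element in ingredients:
--             if element.startswith('---'):
--                 continue
--             elif '      ' in element:
--                 yield from filter(bool, map(str.strip, element.split('      ')))
--             else:
--                 yield element
--     for element in decolumn(ingredients):
--         if bfr and element.startswith('-'):
--             bfr = bfr+element[1:]
--         elif bfr:
--             yield bfr
--             bfr = element
--         else:
--             bfr = element
--     if bfr:
--         yield bfr
-- ===== SOURCE B (Python) =====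
-- def fix_ingredients(ingredients):
--     # B: materialize the normalized lines into a list, then scan it with two
--     # index pointers: each nonempty line opens a chunk, an inner lookahead
--     # advances j over its '-'-continuations, and the chunk is emitted in one
--     # join; empty lines are simply skipped (they only ever close a chunk).
--     norm = []
--     for line in ingredients:
--         if line.startswith('---'):
--             continue
--         if '      ' in line:
--             norm.extend(p for p in (x.strip() for x in line.split('      ')) if p)
--         else:
--             norm.append(line)
--     n = len(norm)
--     i = 0
--     while i < n:
--         if not norm[i]:
--             i += 1
--             continue
--         j = i + 1
--         while j < n and norm[j] and norm[j].startswith('-'):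
--             j += 1
--         yield norm[i] + ''.join(s[1:] for s in norm[i + 1:j])
--         i = j
-- ===== Notes on version B (the rewrite author's own statement) =====
-- stated objective: alternative
-- what changed: Replaces A's streaming fold with a yield-on-transition string buffer by an eager two-pointer index scan: the normalized lines are materialized into a list, each nonempty line opens a chunk, an inner lookahead pointer advances over its '-'-continuations, and the chunk is emitted as one slice join; empty lines are skipped rather than used to reset a buffer.
import Mathlib
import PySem

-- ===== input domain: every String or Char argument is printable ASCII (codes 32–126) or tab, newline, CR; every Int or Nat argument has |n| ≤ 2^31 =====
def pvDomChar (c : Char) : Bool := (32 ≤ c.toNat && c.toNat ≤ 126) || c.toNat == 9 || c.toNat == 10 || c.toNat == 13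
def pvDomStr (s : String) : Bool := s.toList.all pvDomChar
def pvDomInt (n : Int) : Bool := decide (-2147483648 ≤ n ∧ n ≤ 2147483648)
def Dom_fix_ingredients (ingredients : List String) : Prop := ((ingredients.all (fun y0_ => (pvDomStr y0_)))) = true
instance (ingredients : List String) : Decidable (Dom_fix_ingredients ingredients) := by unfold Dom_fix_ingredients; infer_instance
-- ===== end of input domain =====

-- B replaces A's streaming fold (a running string buffer yielded on transitions) by an
-- eager two-pointer index scan over the materialized normalized lines: each nonempty line
-- opens a chunk, an inner lookahead pointer consumes its '-'-continuations, and the chunk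
-- is emitted as one slice join. Objective: alternative decomposition (same cost);
-- return value only — both Pythons are generators.

-- ===== PORT A =====
-- inner generator 'decolumn' (it iterates the closed-over 'ingredients')
def pvDecolumnA (ingredients : List String) : List String :=
  ingredients.flatMap (fun element =>
    if PySem.Str.startswith element "---" then []
    else if PySem.Str.isIn "      " element then
      (((PySem.Str.split? element "      ").getD []).map PySem.Str.strip).filter (fun s => s != "")
    else [element])

-- body of A's main for-loop; state = (yielded so far, bfr); bfr None/"" is falsy
def pvStepA (st : List String × Option String) (element : String) : List String × Option String :=
  if (st.2.getD "" != "") && PySem.Str.startswith element "-" then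
    (st.1, some (st.2.getD "" ++ PySem.Str.slice element (some 1) none))
  else if st.2.getD "" != "" then
    (st.1 ++ [st.2.getD ""], some element)
  else
    (st.1, some element)

def fix_ingredients (ingredients : List String) : List String :=
  let st := (pvDecolumnA ingredients).foldl pvStepA ([], none)
  if st.2.getD "" != "" then st.1 ++ [st.2.getD ""] else st.1

-- ===== PORT B =====
-- B's normalization loop: build the list 'norm' with append/extend
def pvNormB (ingredients : List String) : List String :=
  ingredients.foldl (fun norm line =>
    if PySem.Str.startswith line "---" then norm
    else if PySem.Str.isIn "      " line then
      norm ++ (((PySem.Str.split? line "      ").getD []).map PySem.Str.strip).filter (fun p => p != "")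
    else norm ++ [line]) []

-- B's inner lookahead: advance j while norm[j] is truthy and starts with '-'
def pvInnerJ (norm : List String) (j : Nat) : Nat :=
  if h : j < norm.length ∧ norm.getD j "" ≠ "" ∧ PySem.Str.startswith (norm.getD j "") "-" = true then
    pvInnerJ norm (j + 1)
  else j
termination_by norm.length - j
decreasing_by omega

-- needed for pvOuterB's termination: the lookahead never moves backwards
theorem pvInnerJ_ge (norm : List String) (j : Nat) : j ≤ pvInnerJ norm j := by
  rw [pvInnerJ]
  split
  · exact le_trans (Nat.le_succ j) (pvInnerJ_ge norm (j + 1))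
  · exact le_refl j
termination_by norm.length - j
decreasing_by omega

-- B's outer while-loop over the index i
def pvOuterB (norm : List String) (i : Nat) : List String :=
  if h : i < norm.length then
    if norm.getD i "" = "" then pvOuterB norm (i + 1)
    else
      (norm.getD i "" ++
          PySem.Str.join "" ((PySem.List.slice norm (some ((i : Int) + 1)) (some ((pvInnerJ norm (i + 1) : Nat) : Int))).map
            (fun s => PySem.Str.slice s (some 1) none)))
        :: pvOuterB norm (pvInnerJ norm (i + 1))
  else []
termination_by norm.length - i
decreasing_by
  · omega
  · have := pvInnerJ_ge norm (i + 1); omega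

def fix_ingredients_alt (ingredients : List String) : List String :=
  pvOuterB (pvNormB ingredients) 0

-- ===== PRECONDITION & SPEC =====
def Spec_fix_ingredients (ingredients : List String) (out : List String) : Prop := out = fix_ingredients_alt ingredients
instance (ingredients : List String) (out : List String) : Decidable (Spec_fix_ingredients ingredients out) := by unfold Spec_fix_ingredients; infer_instance

-- ===== CLAIM (what is proved, stated in full; the proofs are below) =====
def Claim_equal_fix_ingredients : Prop := ∀ (ingredients : List String), Dom_fix_ingredients ingredients → Spec_fix_ingredients ingredients (fix_ingredients ingredients)

-- ===== LEMMAS AND PROOFS =====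

-- continuation predicate and tail, shared by the proof-side characterization
def pvP (s : String) : Bool := s != "" && PySem.Str.startswith s "-"
def pvTail (s : String) : String := PySem.Str.slice s (some 1) none

-- the common characterization both programs compute: the list of merged chunks
def pvChunks : List String → List String
  | [] => []
  | x :: rest =>
    if x = "" then pvChunks rest
    else (x ++ PySem.Str.join "" ((rest.takeWhile pvP).map pvTail)) :: pvChunks (rest.dropWhile pvP)
termination_by l => l.length
decreasing_by
  · simp
  · have := List.length_dropWhile_le pvP rest; simp; omega

theorem pv_join_nil : PySem.Str.join "" ([] : List String) = "" := rfl

theorem pv_join_cons (x : String) (l : List String) :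
    PySem.Str.join "" (x :: l) = x ++ PySem.Str.join "" l := by
  apply String.toList_inj.mp
  cases l with
  | nil => simp [PySem.Str.toList_join, PySem.Chars.join_singleton, PySem.Chars.join_nil]
  | cons h t => simp [PySem.Str.toList_join, PySem.Chars.join_cons_cons]

theorem pv_append_ne_empty (s t : String) (h : s ≠ "") : s ++ t ≠ "" := by
  intro he
  apply h
  apply String.toList_inj.mp
  have := congrArg String.toList he
  simp [String.toList_append] at this
  simp [this.1]

-- A's fold with buffer, characterized by pvChunks
theorem pvA_fold (l : List String) : ∀ (out : List String) (bfr : Option String),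
    (bfr.getD "" = "" →
      (let st := l.foldl pvStepA (out, bfr)
       if st.2.getD "" != "" then st.1 ++ [st.2.getD ""] else st.1) = out ++ pvChunks l) ∧
    (bfr.getD "" ≠ "" →
      (let st := l.foldl pvStepA (out, bfr)
       if st.2.getD "" != "" then st.1 ++ [st.2.getD ""] else st.1) =
        out ++ (bfr.getD "" ++ PySem.Str.join "" ((l.takeWhile pvP).map pvTail))
          :: pvChunks (l.dropWhile pvP)) := by
  induction l with
  | nil =>
    intro out bfr
    constructor
    · intro h
      simp [pvChunks, h]
    · intro h
      simp [pvChunks, pv_join_nil, h]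
  | cons x rest ih =>
    intro out bfr
    constructor
    · -- buffer falsy: x becomes the new buffer
      intro h
      have hstep : pvStepA (out, bfr) x = (out, some x) := by
        unfold pvStepA; simp [h]
      rw [List.foldl_cons, hstep]
      by_cases hx : x = ""
      · subst hx
        rw [(ih out (some "")).1 rfl, pvChunks, if_pos rfl]
      · rw [(ih out (some x)).2 hx, pvChunks, if_neg hx]
        rfl
    · -- buffer truthy
      intro h
      have hb : (bfr.getD "" != "") = true := by simpa using h
      by_cases hpx : pvP x = true
      · -- continuation line: append its tail to the buffer
        have hpx' : (x != "" && PySem.Str.startswith x "-") = true := by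
          simpa [pvP] using hpx
        have hsw : PySem.Str.startswith x "-" = true := (Bool.and_eq_true_iff.mp hpx').2
        have hstep : pvStepA (out, bfr) x = (out, some (bfr.getD "" ++ pvTail x)) := by
          unfold pvStepA; rw [hb, hsw]; rfl
        rw [List.foldl_cons, hstep]
        have hne : (some (bfr.getD "" ++ pvTail x)).getD "" ≠ "" :=
          pv_append_ne_empty _ _ h
        rw [(ih out _).2 hne, List.takeWhile_cons, List.dropWhile_cons, hpx]
        simp only [Option.getD_some, if_pos, List.map_cons, pv_join_cons, String.append_assoc]
      · -- transition: flush the buffer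
        have hps : pvP x = false := Bool.eq_false_iff.mpr hpx
        by_cases hx : x = ""
        · subst hx
          have hstep : pvStepA (out, bfr) "" = (out ++ [bfr.getD ""], some "") := by
            unfold pvStepA
            have hsw : PySem.Str.startswith "" "-" = false := by decide
            rw [hsw, Bool.and_false, if_neg (by simp), if_pos hb]
          rw [List.foldl_cons, hstep, (ih (out ++ [bfr.getD ""]) (some "")).1 rfl,
            List.takeWhile_cons, List.dropWhile_cons, hps]
          simp [pvChunks, pv_join_nil, String.append_empty]
        · have hsw : PySem.Str.startswith x "-" = false := by
            have hps' : (x != "" && PySem.Str.startswith x "-") = false := by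
              simpa [pvP] using hps
            rcases Bool.and_eq_false_iff.mp hps' with h1 | h2
            · exact absurd (by simpa using h1) (by simpa using hx)
            · exact h2
          have hstep : pvStepA (out, bfr) x = (out ++ [bfr.getD ""], some x) := by
            unfold pvStepA
            rw [hsw, Bool.and_false, if_neg (by simp), if_pos hb]
          rw [List.foldl_cons, hstep, (ih (out ++ [bfr.getD ""]) (some x)).2 hx,
            List.takeWhile_cons, List.dropWhile_cons, hps]
          simp [pvChunks, if_neg hx, pv_join_nil, String.append_empty]

-- the inner lookahead counts the continuation prefix
theorem pvInnerJ_spec (norm : List String) (j : Nat) :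
    pvInnerJ norm j = j + ((norm.drop j).takeWhile pvP).length := by
  rw [pvInnerJ]
  split
  case isTrue h =>
    obtain ⟨hlt, hne, hsw⟩ := h
    rw [pvInnerJ_spec norm (j + 1)]
    rw [List.drop_eq_getElem_cons hlt, List.takeWhile_cons]
    have hg : norm.getD j "" = norm[j] := List.getD_eq_getElem norm "" hlt
    have hp : pvP norm[j] = true := by
      have h1 : norm[j] ≠ "" := hg ▸ hne
      have h2 : PySem.Str.startswith norm[j] "-" = true := hg ▸ hsw
      unfold pvP
      rw [h2, Bool.and_true]
      simpa using h1
    rw [hp]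
    simp
    omega
  case isFalse h =>
    by_cases hlt : j < norm.length
    · rw [List.drop_eq_getElem_cons hlt, List.takeWhile_cons]
      have hg : norm.getD j "" = norm[j] := List.getD_eq_getElem norm "" hlt
      have hp : pvP norm[j] = false := by
        unfold pvP
        rcases Decidable.not_and_iff_not_or_not.mp (fun hc => h ⟨hlt, hc⟩) with h1 | h2
        · have h1' : norm[j] = "" := by rw [← hg]; exact Decidable.not_not.mp h1
          simp [h1']
        · have h2' : PySem.Str.startswith norm[j] "-" = false :=
            Bool.not_eq_true _ ▸ (hg ▸ h2 : ¬ PySem.Str.startswith norm[j] "-" = true)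
          rw [h2', Bool.and_false]
      rw [hp]
      simp
    · rw [List.drop_eq_nil_of_le (by omega)]
      simp
termination_by norm.length - j
decreasing_by omega

-- B's outer loop computes pvChunks of the remaining suffix
theorem pvOuterB_eq (norm : List String) (i : Nat) :
    pvOuterB norm i = pvChunks (norm.drop i) := by
  rw [pvOuterB]
  split
  case isTrue hlt =>
    have hg : norm.getD i "" = norm[i] := List.getD_eq_getElem norm "" hlt
    rw [List.drop_eq_getElem_cons hlt, pvChunks]
    split
    case isTrue hempty =>
      rw [if_pos (hg.symm.trans hempty), pvOuterB_eq norm (i + 1)]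
    case isFalse hne =>
      rw [if_neg (fun hc => hne (hg.trans hc))]
      have hj := pvInnerJ_spec norm (i + 1)
      set tw := (norm.drop (i + 1)).takeWhile pvP with htw
      have hslice : PySem.List.slice norm (some ((i : Int) + 1)) (some ((pvInnerJ norm (i + 1) : Nat) : Int)) = tw := by
        have hcast : ((i : Int) + 1) = (((i + 1 : Nat) : Int)) := by push_cast; ring
        rw [hcast, PySem.List.slice_natCast, hj]
        simp
        exact ((List.prefix_iff_eq_take).mp (List.takeWhile_prefix pvP)).symm
      have hdrop : norm.drop (pvInnerJ norm (i + 1)) = (norm.drop (i + 1)).dropWhile pvP := by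
        rw [hj, ← List.drop_drop]
        conv_lhs => rw [← List.takeWhile_append_dropWhile (p := pvP) (l := norm.drop (i + 1)), ← htw]
        exact List.drop_left
      rw [pvOuterB_eq norm (pvInnerJ norm (i + 1)), hslice, hdrop, hg]
      rfl
  case isFalse h =>
    rw [List.drop_eq_nil_of_le (by omega), pvChunks]
termination_by norm.length - i
decreasing_by
  · omega
  · have := pvInnerJ_ge norm (i + 1); omega

-- the two normalization phases produce the same list
theorem pv_norm_eq (ingredients : List String) :
    pvNormB ingredients = pvDecolumnA ingredients := by
  unfold pvNormB pvDecolumnA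
  have hfun : (fun (norm : List String) (line : String) =>
      if PySem.Str.startswith line "---" then norm
      else if PySem.Str.isIn "      " line then
        norm ++ (((PySem.Str.split? line "      ").getD []).map PySem.Str.strip).filter (fun p => p != "")
      else norm ++ [line]) =
      (fun (norm : List String) (line : String) => norm ++
        (if PySem.Str.startswith line "---" then []
         else if PySem.Str.isIn "      " line then
           (((PySem.Str.split? line "      ").getD []).map PySem.Str.strip).filter (fun s => s != "")
         else [line])) := by
    funext norm line
    split_ifs <;> simp
  rw [hfun, PySem.List.foldl_append_eq_flatMap]
  simp

-- ===== VERDICT (by name: the statement is the Claim_ definition above) =====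
theorem fix_ingredients_spec : Claim_equal_fix_ingredients := by
  intro ingredients _
  unfold Spec_fix_ingredients fix_ingredients fix_ingredients_alt
  rw [pv_norm_eq, pvOuterB_eq]
  simpa using (pvA_fold (pvDecolumnA ingredients) [] none).1 rfl
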